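-- pv_equiv track=rewrite | github.com/kuanrdebesh/surtaal | backend/audio_ops.py | _required_stem_family
-- ===== SOURCE A (Python) =====
-- def _required_stem_family(target_stems: list[str], requested_stems: str) -> str:
--     if not target_stems:
--         return str(requested_stems or "2")
--     if "no_vocals" in target_stems and any(stem not in {"vocals", "no_vocals"} for stem in target_stems):
--         raise ValueError("Backing can only be extracted by itself or together with Vocals.")
--     if any(stem in {"guitar", "piano"} for stem in target_stems):
--         return "6"
--     if any(stem in {"drums", "bass", "other"} for stem in target_stems):
--         return "4"
--     return "2"
-- ===== SOURCE B (Python) =====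
-- def _required_stem_family(target_stems: list[str], requested_stems: str) -> str:
--     if not target_stems:
--         return str(requested_stems or "2")
--     if "no_vocals" in target_stems and any(s not in ("vocals", "no_vocals") for s in target_stems):
--         raise ValueError("Backing can only be extracted by itself or together with Vocals.")
--     rank = {"guitar": 6, "piano": 6, "drums": 4, "bass": 4, "other": 4}
--     return str(max(rank.get(s, 2) for s in target_stems))
-- ===== Notes on version B (the rewrite author's own statement) =====
-- stated objective: simpler
-- what changed: Replaces the three sequential short-circuiting any() membership scans by a rank table (guitar/piano->6, drums/bass/other->4, default 2) and one max reduction over the stems, stringified.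
import Mathlib
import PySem

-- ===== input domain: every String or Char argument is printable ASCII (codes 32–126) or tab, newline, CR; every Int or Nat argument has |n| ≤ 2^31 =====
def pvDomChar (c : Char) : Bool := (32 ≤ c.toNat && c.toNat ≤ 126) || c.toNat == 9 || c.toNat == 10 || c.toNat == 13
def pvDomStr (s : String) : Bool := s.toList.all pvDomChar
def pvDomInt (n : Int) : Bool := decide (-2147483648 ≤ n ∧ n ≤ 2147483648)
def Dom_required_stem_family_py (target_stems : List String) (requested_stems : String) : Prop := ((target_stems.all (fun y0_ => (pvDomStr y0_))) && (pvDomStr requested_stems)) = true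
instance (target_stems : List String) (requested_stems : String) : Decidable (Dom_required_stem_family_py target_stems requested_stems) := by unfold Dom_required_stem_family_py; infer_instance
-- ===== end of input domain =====

-- B replaces A's three sequential any() membership scans by a rank table plus one max
-- reduction over the stems (objective: simpler); Pre_ excludes the inputs where A raises.


-- ===== PORT A =====
def required_stem_family_py (target_stems : List String) (requested_stems : String) : String :=
  if target_stems = [] then
    (if requested_stems = "" then "2" else requested_stems)  -- str(requested_stems or "2")
  else if target_stems.contains "no_vocals" &&
      target_stems.any (fun s => !(s == "vocals" || s == "no_vocals")) then
    "2"  -- Python raises ValueError here; excluded by Pre_required_stem_family_py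
  else if target_stems.any (fun s => s == "guitar" || s == "piano") then "6"
  else if target_stems.any (fun s => s == "drums" || s == "bass" || s == "other") then "4"
  else "2"

-- ===== PORT B =====
-- rank.get(s, 2) on the literal dict {"guitar":6,"piano":6,"drums":4,"bass":4,"other":4}
def pvRankB (s : String) : Int :=
  if s = "guitar" ∨ s = "piano" then 6
  else if s = "drums" ∨ s = "bass" ∨ s = "other" then 4
  else 2

def required_stem_family_py_alt (target_stems : List String) (requested_stems : String) : String :=
  if target_stems = [] then
    (if requested_stems = "" then "2" else requested_stems)
  else if target_stems.contains "no_vocals" &&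
      target_stems.any (fun s => !(s == "vocals" || s == "no_vocals")) then
    "2"  -- Python raises ValueError here; excluded by Pre_required_stem_family_py
  else
    match target_stems with
    | [] => "2"  -- unreachable: target_stems ≠ []
    | h :: t =>
      -- str(max(rank.get(s, 2) for s in target_stems))
      PySem.Int.toStr (t.foldl (fun m s => max m (pvRankB s)) (pvRankB h))

-- ===== PRECONDITION & SPEC =====
-- Pre_ excludes exactly the inputs on which A raises ValueError ("no_vocals" mixed with a
-- stem other than "vocals"/"no_vocals"); B raises the same ValueError there.
def Pre_required_stem_family_py (target_stems : List String) (requested_stems : String) : Prop :=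
  ¬ ("no_vocals" ∈ target_stems ∧ ∃ s ∈ target_stems, s ≠ "vocals" ∧ s ≠ "no_vocals")
instance (target_stems : List String) (requested_stems : String) : Decidable (Pre_required_stem_family_py target_stems requested_stems) := by unfold Pre_required_stem_family_py; infer_instance

def pvWitness_required_stem_family_py : List String × String := (["guitar", "vocals"], "2")

def Spec_required_stem_family_py (target_stems : List String) (requested_stems : String) (out : String) : Prop := out = required_stem_family_py_alt target_stems requested_stems
instance (target_stems : List String) (requested_stems : String) (out : String) : Decidable (Spec_required_stem_family_py target_stems requested_stems out) := by unfold Spec_required_stem_family_py; infer_instance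

-- ===== CLAIM (what is proved, stated in full; the proofs are below) =====
def Claim_equal_required_stem_family_py : Prop := ∀ (target_stems : List String) (requested_stems : String), Dom_required_stem_family_py target_stems requested_stems → Pre_required_stem_family_py target_stems requested_stems → Spec_required_stem_family_py target_stems requested_stems (required_stem_family_py target_stems requested_stems)

-- ===== LEMMAS AND PROOFS =====

-- the value A's branch chain produces, as an Int
def pvM (ts : List String) : Int :=
  if ts.any (fun s => s == "guitar" || s == "piano") then 6
  else if ts.any (fun s => s == "drums" || s == "bass" || s == "other") then 4
  else 2

lemma pvM_cons (s : String) (t : List String) : pvM (s :: t) = max (pvRankB s) (pvM t) := by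
  simp only [pvM, pvRankB, List.any_cons]
  by_cases hg : s = "guitar" ∨ s = "piano"
  · rcases hg with h | h <;> subst h <;> simp <;> split_ifs <;> omega
  · by_cases hd : s = "drums" ∨ s = "bass" ∨ s = "other"
    · rcases hd with h | h | h <;> subst h <;> simp <;> split_ifs <;> simp_all
    · have h1 : (s == "guitar" || s == "piano") = false := by
        simp only [Bool.or_eq_false_iff, beq_eq_false_iff_ne]; tauto
      have h2 : (s == "drums" || s == "bass" || s == "other") = false := by
        simp only [Bool.or_eq_false_iff, beq_eq_false_iff_ne]; tauto
      simp only [h1, h2, Bool.false_or, if_neg hg, if_neg hd]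
      split_ifs <;> omega

lemma pvFold_eq (t : List String) (a : Int) (ha : 2 ≤ a) :
    t.foldl (fun m s => max m (pvRankB s)) a = max a (pvM t) := by
  induction t generalizing a with
  | nil => simp [pvM, max_eq_left ha]
  | cons s t ih =>
    have hr : 2 ≤ max a (pvRankB s) := le_max_of_le_left ha
    simp only [List.foldl_cons, ih _ hr, pvM_cons]
    omega

lemma pvRankB_le (s : String) : 2 ≤ pvRankB s := by
  simp only [pvRankB]; split_ifs <;> omega

-- ===== VERDICT (by name: the statement is the Claim_ definition above) =====
theorem required_stem_family_py_spec : Claim_equal_required_stem_family_py := by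
  intro ts rs _dom hpre
  unfold Spec_required_stem_family_py required_stem_family_py required_stem_family_py_alt
  cases ts with
  | nil => simp
  | cons h t =>
    simp only [reduceCtorEq, if_false]
    have hguard : ((h :: t).contains "no_vocals" &&
        (h :: t).any (fun s => !(s == "vocals" || s == "no_vocals"))) = false := by
      by_contra hc
      rw [Bool.not_eq_false, Bool.and_eq_true, List.any_eq_true] at hc
      obtain ⟨hmem, s, hs, hcond⟩ := hc
      simp only [Bool.not_eq_true', Bool.or_eq_false_iff, beq_eq_false_iff_ne] at hcond
      exact hpre ⟨by simpa using hmem, s, hs, hcond.1, hcond.2⟩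
    simp only [hguard, Bool.false_eq_true, if_false]
    have : t.foldl (fun m s => max m (pvRankB s)) (pvRankB h) = pvM (h :: t) := by
      rw [pvFold_eq _ _ (pvRankB_le h), pvM_cons]
    rw [this]
    simp only [pvM]
    split_ifs with h1 h2 <;> simp [PySem.Int.toStr] <;> decide
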